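-- pv_equiv track=rewrite | github.com/DannyZednickova/_DIPLOMKA | CTI_Code/middleware_to_neo/_DEPR/ALL_To_Neo.py | stix_type_to_label
-- ===== SOURCE A (Python) =====
-- def stix_type_to_label(stix_type: str) -> str:
--     mapping = {
--         "malware": "Malware",
--         "attack-pattern": "AttackPattern",
--         "intrusion-set": "IntrusionSet",
--         "vulnerability": "Vulnerability",
--         "threat-actor": "ThreatActor",
--         "campaign": "Campaign",
--         "indicator": "Indicator",
--         "tool": "Tool",
--         "identity": "Identity",
--         "report": "Report",
--     }
--     return mapping.get(stix_type, "".join(part.capitalize() for part in stix_type.split("-")))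
-- ===== SOURCE B (Python) =====
-- def stix_type_to_label(stix_type: str) -> str:
--     # Single character-level pass: a '-' is dropped and arms the "capitalize
--     # next" flag; otherwise emit the char upper- or lowercased by the flag.
--     out = []
--     cap_next = True
--     for ch in stix_type:
--         if ch == "-":
--             cap_next = True
--         elif cap_next:
--             out.append(ch.upper())
--             cap_next = False
--         else:
--             out.append(ch.lower())
--     return "".join(out)
-- ===== Notes on version B (the rewrite author's own statement) =====
-- stated objective: simpler
-- what changed: Dropped the ten-entry lookup table (every value equals the fallback on its key) and replaced the split/capitalize/join staging with one character-level pass keeping a capitalize-next flag.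
import Mathlib
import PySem

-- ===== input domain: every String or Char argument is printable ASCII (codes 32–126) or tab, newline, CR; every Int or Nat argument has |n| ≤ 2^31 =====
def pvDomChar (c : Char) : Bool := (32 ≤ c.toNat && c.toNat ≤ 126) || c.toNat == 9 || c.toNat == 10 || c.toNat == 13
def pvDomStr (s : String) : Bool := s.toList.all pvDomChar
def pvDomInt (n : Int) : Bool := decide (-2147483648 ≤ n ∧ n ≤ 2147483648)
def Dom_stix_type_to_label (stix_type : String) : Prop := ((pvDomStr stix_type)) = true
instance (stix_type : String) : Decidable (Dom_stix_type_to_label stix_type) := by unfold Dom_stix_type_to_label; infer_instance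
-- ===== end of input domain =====

-- B drops A's ten-entry lookup table (each value equals the fallback computation on its key)
-- and replaces the split/capitalize/join staging by one character-level pass with a
-- "capitalize next" flag; same result, simpler.

-- ===== PORT A =====
-- part.capitalize() — exact on the ASCII domain: first char uppercased, rest lowercased
def pvCapitalize (cs : List Char) : List Char :=
  match cs with
  | [] => []
  | c :: t => PySem.Chars.upperChar c :: t.map PySem.Chars.lowerChar

def stix_mapping : PySem.Dict String String :=
  PySem.Dict.ofList [("malware", "Malware"), ("attack-pattern", "AttackPattern"),
    ("intrusion-set", "IntrusionSet"), ("vulnerability", "Vulnerability"),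
    ("threat-actor", "ThreatActor"), ("campaign", "Campaign"), ("indicator", "Indicator"),
    ("tool", "Tool"), ("identity", "Identity"), ("report", "Report")]

-- mapping.get(stix_type, "".join(part.capitalize() for part in stix_type.split("-")))
def stix_type_to_label (stix_type : String) : String :=
  stix_mapping.getD stix_type
    (String.ofList (PySem.Chars.join []
      ((PySem.Chars.splitOn stix_type.toList ['-']).map pvCapitalize)))

-- ===== PORT B =====
-- the for-loop of Source B over the characters, carrying the cap_next flag
def pvBGo : List Char → Bool → List Char
  | [], _ => []
  | c :: t, capNext =>
    if c = '-' then pvBGo t true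
    else if capNext then PySem.Chars.upperChar c :: pvBGo t false
    else PySem.Chars.lowerChar c :: pvBGo t false

def stix_type_to_label_alt (stix_type : String) : String :=
  String.ofList (pvBGo stix_type.toList true)

-- ===== PRECONDITION & SPEC =====
def Spec_stix_type_to_label (stix_type : String) (out : String) : Prop := out = stix_type_to_label_alt stix_type
instance (stix_type : String) (out : String) : Decidable (Spec_stix_type_to_label stix_type out) := by unfold Spec_stix_type_to_label; infer_instance

-- ===== CLAIM (what is proved, stated in full; the proofs are below) =====
def Claim_equal_stix_type_to_label : Prop := ∀ (stix_type : String), Dom_stix_type_to_label stix_type → Spec_stix_type_to_label stix_type (stix_type_to_label stix_type)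

-- ===== LEMMAS AND PROOFS =====

-- accumulator-free characterisation of splitting on '-'
def pvParts : List Char → List (List Char)
  | [] => [[]]
  | c :: t => if c = '-' then [] :: pvParts t
              else (c :: (pvParts t).headI) :: (pvParts t).tail

theorem pvParts_cons_self (cs : List Char) :
    pvParts cs = (pvParts cs).headI :: (pvParts cs).tail := by
  cases cs with
  | nil => rfl
  | cons c t => simp [pvParts]; split <;> simp

theorem splitOn_go_spec (fuel : Nat) (cs cur : List Char) (acc : List (List Char))
    (h : cs.length ≤ fuel) :
    PySem.Chars.splitOn.go ['-'] fuel cs cur acc =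
      acc.reverse ++ (cur.reverse ++ (pvParts cs).headI) :: (pvParts cs).tail := by
  induction fuel generalizing cs cur acc with
  | zero =>
    interval_cases hl : cs.length
    rw [List.length_eq_zero_iff] at hl
    subst hl
    simp [PySem.Chars.splitOn.go, pvParts]
  | succ n ih =>
    cases cs with
    | nil => simp [PySem.Chars.splitOn.go, pvParts]
    | cons c t =>
      simp only [PySem.Chars.splitOn.go]
      by_cases hc : c = '-'
      · subst hc
        have hp : List.isPrefixOf ['-'] ('-' :: t) = true := by
          simp [List.isPrefixOf]
        rw [if_pos hp]
        rw [show List.drop (['-'] : List Char).length ('-' :: t) = t from rfl]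
        rw [ih t [] (cur.reverse :: acc) (by simpa using Nat.le_of_succ_le_succ h)]
        simp [pvParts]
        exact (pvParts_cons_self t).symm
      · have hp : List.isPrefixOf ['-'] (c :: t) = false := by
          simp only [List.isPrefixOf, Bool.and_true]
          exact decide_eq_false (fun e => hc e.symm)
        rw [if_neg (by simp [hp])]
        rw [ih t (c :: cur) acc (by simpa using Nat.le_of_succ_le_succ h)]
        simp [pvParts, hc]

theorem splitOn_eq_pvParts (cs : List Char) :
    PySem.Chars.splitOn cs ['-'] = pvParts cs := by
  unfold PySem.Chars.splitOn
  rw [splitOn_go_spec _ _ _ _ (Nat.le_succ_of_le (Nat.le_refl _))]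
  simpa using (pvParts_cons_self cs).symm

theorem join_nil_eq_flatten (l : List (List Char)) :
    PySem.Chars.join [] l = l.flatten := by
  simp [PySem.Chars.join, List.intercalate]
  induction l with
  | nil => rfl
  | cons h t ih => cases t <;> simp_all [List.intersperse]

theorem pvBGo_spec (cs : List Char) :
    pvBGo cs true = ((pvParts cs).map pvCapitalize).flatten ∧
    pvBGo cs false =
      (pvParts cs).headI.map PySem.Chars.lowerChar ++
        ((pvParts cs).tail.map pvCapitalize).flatten := by
  induction cs with
  | nil => simp [pvBGo, pvParts, pvCapitalize]
  | cons c t ih =>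
    by_cases hc : c = '-'
    · subst hc
      constructor
      · simp [pvBGo, pvParts, pvCapitalize, ih.1]
      · simp only [pvBGo, if_pos rfl, pvParts]
        simpa using ih.1
    · constructor
      · simp only [pvBGo, if_neg hc, if_pos rfl, pvParts]
        rw [ih.2]
        conv_rhs => rw [pvParts_cons_self t]
        simp [pvCapitalize, hc]
      · simp only [pvBGo, if_neg hc, pvParts]
        rw [ih.2]
        simp [pvCapitalize, hc]

theorem capjoin_eq_alt (s : String) :
    String.ofList (PySem.Chars.join []
      ((PySem.Chars.splitOn s.toList ['-']).map pvCapitalize)) = stix_type_to_label_alt s := by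
  unfold stix_type_to_label_alt
  rw [splitOn_eq_pvParts, join_nil_eq_flatten, (pvBGo_spec s.toList).1]

-- ===== VERDICT (by name: the statement is the Claim_ definition above) =====
theorem stix_type_to_label_spec : Claim_equal_stix_type_to_label := by
  intro s _
  show stix_mapping.getD s _ = stix_type_to_label_alt s
  rw [capjoin_eq_alt]
  by_cases h1 : s = "malware"; · subst h1; decide
  by_cases h2 : s = "attack-pattern"; · subst h2; decide
  by_cases h3 : s = "intrusion-set"; · subst h3; decide
  by_cases h4 : s = "vulnerability"; · subst h4; decide
  by_cases h5 : s = "threat-actor"; · subst h5; decide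
  by_cases h6 : s = "campaign"; · subst h6; decide
  by_cases h7 : s = "indicator"; · subst h7; decide
  by_cases h8 : s = "tool"; · subst h8; decide
  by_cases h9 : s = "identity"; · subst h9; decide
  by_cases h10 : s = "report"; · subst h10; decide
  have hmk : stix_mapping = PySem.Dict.mk [("malware", "Malware"), ("attack-pattern", "AttackPattern"),
      ("intrusion-set", "IntrusionSet"), ("vulnerability", "Vulnerability"),
      ("threat-actor", "ThreatActor"), ("campaign", "Campaign"), ("indicator", "Indicator"),
      ("tool", "Tool"), ("identity", "Identity"), ("report", "Report")] := by decide
  simp [hmk, PySem.Dict.getD_eq_get?_getD,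
    Ne.symm h1, Ne.symm h2, Ne.symm h3, Ne.symm h4, Ne.symm h5, Ne.symm h6, Ne.symm h7,
    Ne.symm h8, Ne.symm h9, Ne.symm h10, PySem.Dict.get?]
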